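-- pv_equiv track=rewrite | github.com/dangoli/python_beginner | other_nowcoder_exe/hj35_蛇形矩阵.py | snake_matrix
-- ===== SOURCE A (Python) =====
-- def snake_matrix(n):
--     matrix = [[0] * n for _ in range(n)]
--     m = 1
--     for p in range(n):
--         for i in range(p + 1)[::-1]:
--             j = p - i
--             matrix[i][j] = m
--             m += 1
--     return matrix
-- ===== SOURCE B (Python) =====
-- def snake_matrix(n):
--     # Closed form: cell (i, j) on anti-diagonal s = i+j holds the count of cells
--     # in earlier diagonals, s*(s+1)//2, plus the in-diagonal offset j, plus 1;
--     # diagonals with s >= n are never filled and stay 0.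
--     def cell(i, j):
--         s = i + j
--         return s * (s + 1) // 2 + j + 1 if s < n else 0
--     return [[cell(i, j) for j in range(n)] for i in range(n)]
-- ===== Notes on version B (the rewrite author's own statement) =====
-- stated objective: simpler
-- what changed: Replaces the diagonal-by-diagonal traversal with a running counter and in-place assignments by a direct per-cell comprehension: each cell is the triangular count of earlier anti-diagonals plus its in-diagonal offset, and cells beyond the last filled diagonal stay zero.
import Mathlib
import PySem

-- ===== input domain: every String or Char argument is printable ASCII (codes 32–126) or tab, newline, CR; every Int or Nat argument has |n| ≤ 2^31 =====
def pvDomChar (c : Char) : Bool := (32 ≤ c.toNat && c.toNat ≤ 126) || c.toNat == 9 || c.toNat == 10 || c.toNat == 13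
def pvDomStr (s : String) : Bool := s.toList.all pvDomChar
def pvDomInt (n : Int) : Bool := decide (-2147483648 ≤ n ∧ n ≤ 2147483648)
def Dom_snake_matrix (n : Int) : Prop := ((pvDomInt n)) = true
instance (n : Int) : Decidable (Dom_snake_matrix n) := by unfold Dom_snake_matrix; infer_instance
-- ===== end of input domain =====

-- B replaces A's diagonal walk with a running counter by a per-cell closed form; objective: simpler.

-- ===== PORT A =====
-- matrix[i][j] = v ; exact for the nonnegative in-range indices A uses (0 ≤ i ≤ p < n, j = p - i)
def pySet2 (mat : List (List Int)) (i j : Int) (v : Int) : List (List Int) :=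
  mat.set i.toNat ((mat.getD i.toNat []).set j.toNat v)

-- body of the inner 'for i in range(p+1)[::-1]' loop, state = (matrix, m)
def snakeInner (p : Int) (st : List (List Int) × Int) (i : Int) : List (List Int) × Int :=
  -- j = p - i
  (pySet2 st.1 i (p - i) st.2, st.2 + 1)

def snake_matrix (n : Int) : List (List Int) :=
  -- matrix = [[0] * n for _ in range(n)]
  let matrix : List (List Int) := (PySem.List.pyRange 0 n 1).map (fun _ => List.replicate n.toNat (0 : Int))
  -- range(p+1)[::-1] is the full step -(1) slice, i.e. the reversed list
  let st := (PySem.List.pyRange 0 n 1).foldl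
    (fun st p => (PySem.List.pyRange 0 (p + 1) 1).reverse.foldl (snakeInner p) st)
    (matrix, 1)
  st.1

-- ===== PORT B =====
-- cell(i, j) from Source B
def snakeCell (n i j : Int) : Int :=
  let s := i + j
  if s < n then PySem.Int.floordiv (s * (s + 1)) 2 + j + 1 else 0

def snake_matrix_alt (n : Int) : List (List Int) :=
  (PySem.List.pyRange 0 n 1).map (fun i =>
    (PySem.List.pyRange 0 n 1).map (fun j => snakeCell n i j))

-- ===== PRECONDITION & SPEC =====
def Spec_snake_matrix (n : Int) (out : List (List Int)) : Prop := out = snake_matrix_alt n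
instance (n : Int) (out : List (List Int)) : Decidable (Spec_snake_matrix n out) := by unfold Spec_snake_matrix; infer_instance

-- ===== CLAIM (what is proved, stated in full; the proofs are below) =====
def Claim_equal_snake_matrix : Prop := ∀ (n : Int), Dom_snake_matrix n → Spec_snake_matrix n (snake_matrix n)

-- ===== LEMMAS AND PROOFS =====

-- triangular count: cells in the diagonals before diagonal s
def Tz (s : Nat) : Int := ((s * (s + 1) / 2 : Nat) : Int)

-- matrix given by an entry function
def fmat (N : Nat) (f : Nat → Nat → Int) : List (List Int) :=
  (List.range N).map (fun i => (List.range N).map (fun j => f i j))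

theorem Tz_succ (s : Nat) : Tz (s + 1) = Tz s + (s : Int) + 1 := by
  unfold Tz
  have h : (s + 1) * (s + 1 + 1) = s * (s + 1) + (s + 1) * 2 := by ring
  rw [h, Nat.add_mul_div_right _ _ (by norm_num : 0 < 2)]
  push_cast; ring

theorem fmat_congr (N : Nat) (f g : Nat → Nat → Int)
    (h : ∀ a b, a < N → b < N → f a b = g a b) : fmat N f = fmat N g := by
  unfold fmat
  refine List.map_congr_left (fun a ha => ?_)
  refine List.map_congr_left (fun b hb => ?_)
  exact h a b (List.mem_range.mp ha) (List.mem_range.mp hb)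

theorem pySet2_fmat (N i j : Nat) (hi : i < N) (_hj : j < N) (f : Nat → Nat → Int) (v : Int) :
    pySet2 (fmat N f) (i : Int) (j : Int) v
      = fmat N (fun a b => if a = i ∧ b = j then v else f a b) := by
  unfold pySet2 fmat
  simp only [Int.toNat_natCast]
  have hgetD : ((List.range N).map (fun a => (List.range N).map (fun b => f a b))).getD i []
      = (List.range N).map (fun b => f i b) := by
    rw [List.getD_eq_getElem _ _ (by simpa using hi)]
    simp
  rw [hgetD]
  apply List.ext_getElem
  · simp
  · intro a h1 h2
    simp only [List.getElem_set, List.getElem_map, List.getElem_range]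
    by_cases hai : i = a
    · subst hai
      simp only [if_pos rfl]
      apply List.ext_getElem
      · simp
      · intro b hb1 hb2
        simp only [List.getElem_set, List.getElem_map, List.getElem_range]
        by_cases hbj : j = b
        · subst hbj; simp
        · simp [hbj, Ne.symm hbj]
    · simp only [if_neg hai]
      have : ¬ (a = i) := fun h => hai h.symm
      simp [this]

theorem innerFold (N p : Nat) (hp : p < N) :
    ∀ (k : Nat), k ≤ p → ∀ (f : Nat → Nat → Int) (c : Int),
      ((PySem.List.pyRange 0 ((k : Int) + 1) 1).reverse.foldl (snakeInner (p : Int)) (fmat N f, c))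
        = (fmat N (fun a b => if a ≤ k ∧ a + b = p then c + ((k - a : Nat) : Int) else f a b),
           c + ((k : Int) + 1)) := by
  intro k
  induction k with
  | zero =>
    intro _ f c
    rw [show ((0 : Nat) : Int) + 1 = 0 + 1 by norm_num, PySem.List.pyRange_one_singleton]
    simp only [List.reverse_singleton, List.foldl_cons, List.foldl_nil, snakeInner]
    rw [show ((p : Int) - (0 : Int)) = ((p : Nat) : Int) by push_cast; ring,
        show ((0 : Int)) = ((0 : Nat) : Int) by norm_num]
    rw [pySet2_fmat N 0 p (by omega) hp f c, Prod.mk.injEq]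
    refine ⟨?_, ?_⟩
    · apply fmat_congr
      intro a b _ _
      by_cases h1 : a = 0 ∧ b = p
      · rw [if_pos h1, if_pos (by omega)]
        have : a = 0 := h1.1
        subst this; simp
      · rw [if_neg h1, if_neg (by omega)]
    · push_cast; ring
  | succ k ih =>
    intro hk f c
    have h1 : PySem.List.pyRange 0 ((k : Int) + 1 + 1) 1
        = PySem.List.pyRange 0 ((k : Int) + 1) 1 ++ [(k : Int) + 1] := by
      exact PySem.List.pyRange_one_succ_right (by omega : (0:Int) ≤ (k : Int) + 1)
    rw [show (((k + 1 : Nat)) : Int) + 1 = (k : Int) + 1 + 1 by push_cast; ring, h1]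
    rw [List.reverse_append, List.reverse_singleton, List.singleton_append, List.foldl_cons]
    have hstep : snakeInner (p : Int) (fmat N f, c) ((k : Int) + 1)
        = (fmat N (fun a b => if a = k + 1 ∧ b = p - (k + 1) then c else f a b), c + 1) := by
      unfold snakeInner
      rw [show ((k : Int) + 1) = (((k + 1 : Nat)) : Int) by push_cast; ring]
      rw [show ((p : Int) - ((k + 1 : Nat) : Int)) = (((p - (k + 1) : Nat)) : Int) by omega]
      rw [pySet2_fmat N (k + 1) (p - (k + 1)) (by omega) (by omega)]
    rw [hstep, ih (by omega), Prod.mk.injEq]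
    refine ⟨?_, ?_⟩
    · apply fmat_congr
      intro a b _ _
      by_cases hnew : a ≤ k ∧ a + b = p
      · rw [if_pos hnew, if_pos (by omega)]
        have h2 : (((k + 1) - a : Nat) : Int) = ((k - a : Nat) : Int) + 1 := by omega
        rw [h2]; ring
      · rw [if_neg hnew]
        by_cases hedge : a = k + 1 ∧ b = p - (k + 1)
        · rw [if_pos hedge, if_pos (by omega)]
          have : (((k + 1) - a : Nat) : Int) = 0 := by omega
          rw [this]; ring
        · rw [if_neg hedge, if_neg (by omega)]
    · push_cast; ring

theorem outerFold (N : Nat) :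
    ∀ (k : Nat), k ≤ N →
      ((PySem.List.pyRange 0 (k : Int) 1).foldl
          (fun st p => (PySem.List.pyRange 0 (p + 1) 1).reverse.foldl (snakeInner p) st)
          (fmat N (fun _ _ => 0), 1))
        = (fmat N (fun a b => if a + b < k then Tz (a + b) + (b : Int) + 1 else 0), Tz k + 1) := by
  intro k
  induction k with
  | zero =>
    intro _
    rw [show ((0 : Nat) : Int) = 0 by norm_num, PySem.List.pyRange_one_eq_nil (by omega)]
    simp only [List.foldl_nil]
    rw [Prod.mk.injEq]
    refine ⟨?_, ?_⟩
    · apply fmat_congr; intro a b _ _; rw [if_neg (by omega)]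
    · unfold Tz; norm_num
  | succ k ih =>
    intro hk
    rw [show (((k + 1 : Nat)) : Int) = (k : Int) + 1 by push_cast; ring]
    rw [PySem.List.pyRange_one_succ_right (by omega : (0:Int) ≤ (k : Int)), List.foldl_append]
    rw [ih (by omega)]
    simp only [List.foldl_cons, List.foldl_nil]
    rw [innerFold N k (by omega) k (le_refl k), Prod.mk.injEq]
    refine ⟨?_, ?_⟩
    · apply fmat_congr
      intro a b _ _
      by_cases hdiag : a ≤ k ∧ a + b = k
      · rw [if_pos hdiag, if_pos (by omega)]
        have hb : b = k - a := by omega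
        have h2 : ((k - a : Nat) : Int) = (b : Int) := by omega
        rw [h2, hdiag.2]; ring
      · rw [if_neg hdiag]
        by_cases hlt : a + b < k
        · rw [if_pos hlt, if_pos (by omega)]
        · rw [if_neg hlt, if_neg (by omega)]
    · rw [Tz_succ]; push_cast; ring

theorem alt_eq_fmat (n : Int) (hn : 0 < n) :
    snake_matrix_alt n
      = fmat n.toNat (fun a b => if a + b < n.toNat then Tz (a + b) + (b : Int) + 1 else 0) := by
  obtain ⟨N, hN⟩ : ∃ N : Nat, n = (N : Int) := ⟨n.toNat, by omega⟩
  subst hN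
  unfold snake_matrix_alt fmat
  rw [PySem.List.pyRange_zero_nat]
  simp only [List.map_map, Int.toNat_natCast]
  refine List.map_congr_left (fun a ha => ?_)
  refine List.map_congr_left (fun b hb => ?_)
  have ha' := List.mem_range.mp ha
  have hb' := List.mem_range.mp hb
  simp only [Function.comp, snakeCell]
  by_cases h : a + b < N
  · rw [if_pos (by push_cast; omega), if_pos h]
    have h1 : ((a : Int) + b) * ((a : Int) + b + 1) = (((a + b) * (a + b + 1) : Nat) : Int) := by
      push_cast; ring
    rw [h1, show (2:Int) = ((2:Nat):Int) from rfl, PySem.Int.floordiv_natCast]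
    unfold Tz; norm_num
  · rw [if_neg (by push_cast; omega), if_neg h]

theorem a_eq_fmat (n : Int) (hn : 0 < n) :
    snake_matrix n
      = fmat n.toNat (fun a b => if a + b < n.toNat then Tz (a + b) + (b : Int) + 1 else 0) := by
  obtain ⟨N, hN⟩ : ∃ N : Nat, n = (N : Int) := ⟨n.toNat, by omega⟩
  subst hN
  simp only [snake_matrix, Int.toNat_natCast]
  have hinit : (PySem.List.pyRange 0 (N : Int) 1).map (fun _ => List.replicate N (0 : Int))
      = fmat N (fun _ _ => 0) := by
    unfold fmat
    rw [PySem.List.pyRange_zero_nat]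
    simp only [List.map_map, List.map_const']
    simp [List.eq_replicate_iff]
  rw [hinit, outerFold N N (le_refl _)]
  rfl

-- ===== VERDICT (by name: the statement is the Claim_ definition above) =====
theorem snake_matrix_spec : Claim_equal_snake_matrix := by
  intro n _
  unfold Spec_snake_matrix
  by_cases hn : 0 < n
  · rw [a_eq_fmat n hn, alt_eq_fmat n hn]
  · have h : PySem.List.pyRange 0 n 1 = [] := PySem.List.pyRange_one_eq_nil (by omega)
    unfold snake_matrix snake_matrix_alt
    simp [h]
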